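-- pv_equiv track=rewrite | github.com/sarathchandra0007/python_practice | python_practice/unique_string.py | uni_char
-- ===== SOURCE A (Python) =====
-- def uni_char(s):
--     a=dict()
--     for i in s:
--         if i in a:
--             return False
--         else:
--             a[i]=1
--     return True
-- ===== SOURCE B (Python) =====
-- def uni_char(s):
--     return len(set(s)) == len(s)
-- ===== Notes on version B (the rewrite author's own statement) =====
-- stated objective: simpler
-- what changed: Replaces the explicit loop with an early-exit dict membership test by a single set construction and a length comparison (len(set(s)) == len(s)); no loop, branch or early return remains.
import Mathlib
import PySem

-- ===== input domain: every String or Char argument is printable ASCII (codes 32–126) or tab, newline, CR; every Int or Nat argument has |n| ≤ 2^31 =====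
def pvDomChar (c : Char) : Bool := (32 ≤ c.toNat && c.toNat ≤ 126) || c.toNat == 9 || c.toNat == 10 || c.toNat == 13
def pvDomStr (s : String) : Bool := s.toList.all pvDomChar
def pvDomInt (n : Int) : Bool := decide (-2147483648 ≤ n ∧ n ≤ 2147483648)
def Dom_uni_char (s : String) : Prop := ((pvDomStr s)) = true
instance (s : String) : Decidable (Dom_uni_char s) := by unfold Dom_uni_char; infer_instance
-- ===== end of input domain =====

-- B replaces A's loop with an early-exit dict membership test by a one-pass set build and a length comparison (simpler).

-- ===== PORT A =====
-- the 'for i in s' loop with the dict 'a'; returns False on the first repeated character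
def uniCharLoop (a : PySem.Dict Char Int) : List Char → Bool
  | [] => true
  | i :: rest => if a.contains i then false else uniCharLoop (a.insert i 1) rest

def uni_char (s : String) : Bool := uniCharLoop PySem.Dict.empty s.toList

-- ===== PORT B =====
def uni_char_alt (s : String) : Bool := (PySem.Set.ofList s.toList).length == s.toList.length

-- ===== PRECONDITION & SPEC =====
def Spec_uni_char (s : String) (out : Bool) : Prop := out = uni_char_alt s
instance (s : String) (out : Bool) : Decidable (Spec_uni_char s out) := by unfold Spec_uni_char; infer_instance

-- ===== CLAIM (what is proved, stated in full; the proofs are below) =====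
def Claim_equal_uni_char : Prop := ∀ (s : String), Dom_uni_char s → Spec_uni_char s (uni_char s)

-- ===== LEMMAS AND PROOFS =====

theorem uniCharLoop_true_iff (l : List Char) : ∀ (a : PySem.Dict Char Int),
    uniCharLoop a l = true ↔ (l.Nodup ∧ ∀ c ∈ l, a.contains c = false) := by
  induction l with
  | nil => intro a; simp [uniCharLoop]
  | cons x xs ih =>
    intro a
    simp only [uniCharLoop]
    by_cases hx : a.contains x = true
    · simp only [hx, if_true]
      constructor
      · intro h; cases h
      · rintro ⟨_, hall⟩
        have := hall x (by simp)
        simp [hx] at this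
    · have hx' : a.contains x = false := by
        cases h : a.contains x with
        | false => rfl
        | true => exact absurd h hx
      rw [hx']
      simp only [if_neg (Bool.false_ne_true), ih]
      constructor
      · rintro ⟨hnd, hall⟩
        refine ⟨List.nodup_cons.mpr ⟨?_, hnd⟩, ?_⟩
        · intro hmem
          have := hall x hmem
          simp at this
        · intro c hc
          rcases List.mem_cons.mp hc with rfl | hc'
          · exact hx'
          · have := hall c hc'
            simp [PySem.Dict.contains_insert] at this
            exact this.2
      · rintro ⟨hnd, hall⟩
        have hnx : x ∉ xs := (List.nodup_cons.mp hnd).1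
        refine ⟨(List.nodup_cons.mp hnd).2, ?_⟩
        intro c hc
        have hne : c ≠ x := fun h => hnx (h ▸ hc)
        simp [PySem.Dict.contains_insert, hne, hall c (List.mem_cons_of_mem _ hc)]

theorem ofList_length_eq_iff (l : List Char) :
    ((PySem.Set.ofList l).length = l.length) ↔ l.Nodup := by
  constructor
  · intro h
    by_contra hnd
    -- find a strict length drop by induction
    induction l with
    | nil => exact hnd List.nodup_nil
    | cons x xs ih =>
      rw [PySem.Set.ofList_cons] at h
      simp only [List.length_cons] at h
      by_cases hx : x ∈ xs
      · have hxof : x ∈ PySem.Set.ofList xs := (PySem.Set.mem_ofList xs x).mpr hx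
        have hlt : ((PySem.Set.ofList xs).discard x).length < (PySem.Set.ofList xs).length := by
          unfold PySem.Set.discard
          apply List.length_filter_lt_length_iff_exists.mpr
          exact ⟨x, hxof, by simp⟩
        have hle := PySem.Set.length_ofList_le xs
        omega
      · have hdis : (PySem.Set.ofList xs).discard x = PySem.Set.ofList xs := by
          unfold PySem.Set.discard
          apply List.filter_eq_self.mpr
          intro y hy
          have hyxs : y ∈ xs := (PySem.Set.mem_ofList xs y).mp hy
          have : y ≠ x := fun h => hx (h ▸ hyxs)
          simp [this]
        rw [hdis] at h
        have hnd' : ¬ xs.Nodup := fun hn => hnd (List.nodup_cons.mpr ⟨hx, hn⟩)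
        exact ih (by omega) hnd'
  · intro h
    rw [PySem.Set.ofList_eq_self_of_nodup l h]

-- ===== VERDICT (by name: the statement is the Claim_ definition above) =====
theorem uni_char_spec : Claim_equal_uni_char := by
  intro s _
  unfold Spec_uni_char uni_char uni_char_alt
  rw [Bool.eq_iff_iff, uniCharLoop_true_iff, beq_iff_eq, ofList_length_eq_iff]
  simp [PySem.Dict.contains_empty]
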